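-- pv_equiv track=rewrite | github.com/zhonghe-ASP-2/feature_judge_template | code/feature_judge.py | z_judge
-- ===== SOURCE A (Python) =====
-- window_size = 60
--
-- def sign(value, pre):
--     if value > 0:
--         return 1
--     elif value == 0:
--         return pre
--     else:
--         return 0
--
-- def sign1(value):
--     if value > 0:
--         return 1
--     elif value < 0:
--         return -1
--     else:
--         return 0
--
-- def timeseries_represent(timeseries):
--     diff1 = []
--     diff2 = []
--     for _, timeseries_value_ in enumerate(timeseries):
--         if _ == 0:
--             continue
--         diff2.append(sign1(timeseries[_] - timeseries[_ - 1]))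
--         pre = sum(diff2[max(0, _-window_size): _-1])
--         if pre > 0:
--             pre = 1
--         else:
--             pre = 0
--         diff1.append(sign(timeseries[_]-timeseries[_-1], pre))
--
--     return diff1
--
-- def z_judge(timeseries):
--     timeseries = timeseries_represent(timeseries)
--     flag = 0
--     for i in range(len(timeseries)):
--         if flag == 0 and timeseries[i] == 0:
--             flag = 2
--         if flag == 2 and timeseries[i] == 1:
--             return False
--     if flag == 2:
--         return True
--     else:
--         return False
-- ===== SOURCE B (Python) =====
-- from collections import deque
--
-- window_size = 60
--
-- def z_judge(timeseries):
--     # One fused pass over consecutive pairs; O(1) window via deque + running sum,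
--     # early exit when a 1 follows a 0.
--     win = deque(maxlen=window_size - 1)
--     wsum = 0
--     zero_seen = False
--     prev = None
--     for x in timeseries:
--         if prev is not None:
--             d = x - prev
--             if d > 0:
--                 v = 1
--             elif d < 0:
--                 v = 0
--             else:
--                 v = 1 if wsum > 0 else 0
--             if v == 0:
--                 zero_seen = True
--             elif zero_seen:
--                 return False
--             s = 1 if d > 0 else (-1 if d < 0 else 0)
--             if len(win) == win.maxlen:
--                 wsum -= win[0]
--             win.append(s)
--             wsum += s
--         prev = x
--     return zero_seen
-- ===== Notes on version B (the rewrite author's own statement) =====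
-- stated objective: faster
-- what changed: B fuses timeseries_represent and the flag scan into a single pass over consecutive pairs, replacing the per-step slice-and-sum of diff2 by a deque(maxlen=59) with a running sum and exiting early when a 1 follows a 0, without building the diff1/diff2 lists.
import Mathlib
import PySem

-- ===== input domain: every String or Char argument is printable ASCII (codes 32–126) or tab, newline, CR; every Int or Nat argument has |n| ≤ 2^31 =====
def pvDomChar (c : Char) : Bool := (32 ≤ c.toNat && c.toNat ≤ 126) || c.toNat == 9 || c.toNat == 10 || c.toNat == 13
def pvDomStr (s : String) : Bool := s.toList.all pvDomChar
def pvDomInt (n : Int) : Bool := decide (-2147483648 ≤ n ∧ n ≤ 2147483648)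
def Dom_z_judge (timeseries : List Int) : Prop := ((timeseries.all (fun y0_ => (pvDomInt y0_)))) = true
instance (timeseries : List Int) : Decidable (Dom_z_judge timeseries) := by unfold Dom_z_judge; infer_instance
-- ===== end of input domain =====

-- B fuses timeseries_represent and the flag scan into one pass over consecutive
-- pairs with an O(1) sliding-window running sum and an early exit (objective: faster, constant factor).

-- ===== PORT A =====
def sign (value : Int) (pre : Int) : Int :=
  if value > 0 then 1 else if value = 0 then pre else 0

def sign1 (value : Int) : Int :=
  if value > 0 then 1 else if value < 0 then -1 else 0

-- loop body of timeseries_represent (state = (diff1, diff2))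
def tsRepStep (ts : List Int) (st : List Int × List Int) (p : Int × Int) : List Int × List Int :=
  if p.1 = 0 then st
  else
    let d := PySem.List.pyGetD ts p.1 0 - PySem.List.pyGetD ts (p.1 - 1) 0
    let diff2 := st.2 ++ [sign1 d]
    let pre0 := (PySem.List.slice diff2 (some (max 0 (p.1 - 60))) (some (p.1 - 1))).sum
    let pre : Int := if pre0 > 0 then 1 else 0
    (st.1 ++ [sign d pre], diff2)

def timeseries_represent (timeseries : List Int) : List Int :=
  ((PySem.List.enumerate timeseries 0).foldl (tsRepStep timeseries) ([], [])).1

-- the flag loop of z_judge, with its two early-return points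
def zJudgeLoop : List Int → Int → Bool
  | [], flag => flag == 2
  | v :: rest, flag =>
    let flag := if flag == 0 && v == 0 then 2 else flag
    if flag == 2 && v == 1 then false else zJudgeLoop rest flag

def z_judge (timeseries : List Int) : Bool :=
  zJudgeLoop (timeseries_represent timeseries) 0

-- ===== PORT B =====
-- fused single pass; win models deque(maxlen=59), wsum its running sum
def zAltLoop : Int → List Int → List Int → Int → Bool → Bool
  | _, [], _, _, zeroSeen => zeroSeen
  | prev, x :: rest, win, wsum, zeroSeen =>
    let d := x - prev
    let v : Int := if d > 0 then 1 else if d < 0 then 0 else if wsum > 0 then 1 else 0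
    if v ≠ 0 && zeroSeen then false
    else
      let zeroSeen' := zeroSeen || v == 0
      let s : Int := if d > 0 then 1 else if d < 0 then -1 else 0
      let wsum' := (if win.length = 59 then wsum - win.headD 0 else wsum) + s
      let win' := if win.length = 59 then win.tail ++ [s] else win ++ [s]
      zAltLoop x rest win' wsum' zeroSeen'

def z_judge_alt (timeseries : List Int) : Bool :=
  match timeseries with
  | [] => false
  | x :: rest => zAltLoop x rest [] 0 false

-- ===== PRECONDITION & SPEC =====
def Spec_z_judge (timeseries : List Int) (out : Bool) : Prop := out = z_judge_alt timeseries
instance (timeseries : List Int) (out : Bool) : Decidable (Spec_z_judge timeseries out) := by unfold Spec_z_judge; infer_instance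

-- ===== CLAIM (what is proved, stated in full; the proofs are below) =====
def Claim_equal_z_judge : Prop := ∀ (timeseries : List Int), Dom_z_judge timeseries → Spec_z_judge timeseries (z_judge timeseries)

-- ===== LEMMAS AND PROOFS =====

-- consecutive differences ts[i+1] - ts[i]
def diffs : List Int → List Int
  | a :: b :: r => (b - a) :: diffs (b :: r)
  | _ => []

-- the last ≤ 59 elements (the sliding window over the sign history)
def lastW (h : List Int) : List Int := h.drop (h.length - 59)

-- common reference machine: scan the diff list, keeping the full sign history h
def refLoop : List Int → List Int → Bool → Bool
  | _, [], seen => seen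
  | h, d :: ds, seen =>
    let v : Int := if d > 0 then 1 else if d < 0 then 0 else if (lastW h).sum > 0 then 1 else 0
    if v ≠ 0 && seen then false
    else refLoop (h ++ [sign1 d]) ds (seen || v == 0)

-- the diff1 list of A, computed structurally over the diff list
def repList : List Int → List Int → List Int
  | _, [] => []
  | h, d :: ds =>
    let pre : Int := if (lastW h).sum > 0 then 1 else 0
    sign d pre :: repList (h ++ [sign1 d]) ds

theorem length_diffs (ts : List Int) : (diffs ts).length = ts.length - 1 := by
  match ts with
  | [] => rfl
  | [a] => rfl
  | a :: b :: r =>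
    have := length_diffs (b :: r)
    simp [diffs] at this ⊢; omega

theorem diffs_getElem? (ts : List Int) (j : Nat) (h : j + 1 < ts.length) :
    (diffs ts)[j]? = some (ts[j + 1]'h - ts[j]'(by omega)) := by
  match ts, j with
  | a :: b :: r, 0 => simp [diffs]
  | a :: b :: r, j + 1 =>
    have h' : j + 1 < (b :: r).length := by simpa using Nat.lt_of_succ_lt_succ h
    have := diffs_getElem? (b :: r) j h'
    simpa [diffs] using this

theorem slice_eq_lastW (h : List Int) (s : Int) :
    PySem.List.slice (h ++ [s]) (some (max 0 ((h.length : Int) + 1 - 60))) (some ((h.length : Int) + 1 - 1))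
      = lastW h := by
  set m := h.length with hm
  rw [PySem.List.slice_toNat _ (by positivity) (by omega)]
  have h1 : (max 0 ((m : Int) + 1 - 60)).toNat = m - 59 := by omega
  have h2 : ((m : Int) + 1 - 1).toNat = m := by omega
  rw [h1, h2]
  have h3 : m - 59 ≤ h.length := by omega
  rw [List.drop_append_of_le_length h3]
  have h4 : (h.drop (m - 59)).length = m - (m - 59) := by simp [← hm]
  rw [List.take_left' h4]
  rfl

theorem lastW_snoc (h : List Int) (s : Int) :
    lastW (h ++ [s]) = if (lastW h).length = 59 then (lastW h).tail ++ [s] else lastW h ++ [s] := by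
  set m := h.length with hm
  have hl : (lastW h).length = m - (m - 59) := by simp [lastW, ← hm]
  by_cases h59 : m ≥ 59
  · have : (lastW h).length = 59 := by omega
    rw [if_pos this]
    show (h ++ [s]).drop ((h ++ [s]).length - 59) = _
    have : (h ++ [s]).length - 59 = (m - 59) + 1 := by simp [← hm]; omega
    rw [this, List.drop_append_of_le_length (by omega)]
    congr 1
    rw [show m - 59 + 1 = (m - 59) + 1 from rfl, ← List.drop_drop]
    simp [lastW, ← hm]
  · have : ¬ (lastW h).length = 59 := by omega
    rw [if_neg this]
    show (h ++ [s]).drop ((h ++ [s]).length - 59) = _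
    have hz : (h ++ [s]).length - 59 = 0 := by simp [← hm]; omega
    have h0 : m - 59 = 0 := by omega
    rw [hz]
    simp [lastW, ← hm, h0]

theorem tsRep_master (ts : List Int) (suf : List Int) (n : Nat) (acc h : List Int)
    (hn : 1 ≤ n) (hsuf : suf = ts.drop n)
    (hh : h = ((diffs ts).take (n - 1)).map sign1) :
    ((PySem.List.enumerate suf (n : Int)).foldl (tsRepStep ts) (acc, h)).1
      = acc ++ repList h ((diffs ts).drop (n - 1)) := by
  induction suf generalizing n acc h with
  | nil =>
    have hlen : ts.length ≤ n := by
      by_contra hlt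
      push_neg at hlt
      have := List.drop_eq_nil_iff.mp hsuf.symm
      omega
    have : (diffs ts).drop (n - 1) = [] := by
      rw [List.drop_eq_nil_iff, length_diffs]; omega
    simp [PySem.List.enumerate, this, repList]
  | cons x rest ih =>
    have hnlt : n < ts.length := by
      by_contra hge
      push_neg at hge
      rw [List.drop_eq_nil_iff.mpr hge] at hsuf
      exact List.cons_ne_nil _ _ hsuf
    have hxn : ts[n]? = some x := by
      have h0 : (ts.drop n)[0]? = some x := by rw [← hsuf]; rfl
      rw [List.getElem?_drop] at h0
      simpa using h0
    have hx : ts[n]'hnlt = x := by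
      have := List.getElem?_eq_getElem (l := ts) (i := n) hnlt
      rw [hxn] at this; exact (Option.some.inj this).symm
    rw [PySem.List.enumerate_cons, List.foldl_cons]
    have hstep : tsRepStep ts (acc, h) ((n : Int), x)
        = (acc ++ [sign (ts[n]'hnlt - ts[n-1]'(by omega)) (if (lastW h).sum > 0 then 1 else 0)],
           h ++ [sign1 (ts[n]'hnlt - ts[n-1]'(by omega))]) := by
      unfold tsRepStep
      have hne : ¬ ((n : Int), x).1 = 0 := by simp; omega
      rw [if_neg hne]
      simp only
      have e1 : PySem.List.pyGetD ts ((n : Int), x).1 0 = ts[n]'hnlt := by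
        show PySem.List.pyGetD ts (n : Int) 0 = _
        rw [PySem.List.pyGetD_natCast, List.getD_eq_getElem _ _ hnlt]
      have e2 : PySem.List.pyGetD ts (((n : Int), x).1 - 1) 0 = ts[n-1]'(by omega) := by
        show PySem.List.pyGetD ts ((n : Int) - 1) 0 = _
        have : ((n : Int) - 1) = ((n - 1 : Nat) : Int) := by omega
        rw [this, PySem.List.pyGetD_natCast, List.getD_eq_getElem _ _ (by omega)]
      rw [e1, e2]
      have hhl : h.length = n - 1 := by
        rw [hh, List.length_map, List.length_take, length_diffs]; omega
      have hsl : PySem.List.slice (h ++ [sign1 (ts[n]'hnlt - ts[n-1]'(by omega))])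
            (some (max 0 (((n : Int), x).1 - 60))) (some (((n : Int), x).1 - 1))
          = lastW h := by
        have := slice_eq_lastW h (sign1 (ts[n]'hnlt - ts[n-1]'(by omega)))
        have c1 : ((h.length : Int) + 1 - 60) = (((n : Int), x).1 - 60) := by simp [hhl]; omega
        have c2 : ((h.length : Int) + 1 - 1) = (((n : Int), x).1 - 1) := by simp [hhl]; omega
        rw [c1, c2] at this
        exact this
      rw [hsl]
    rw [hstep]
    have hidx : n - 1 + 1 = n := Nat.sub_add_cancel hn
    have hdval : (diffs ts)[n-1]? = some (ts[n]'hnlt - ts[n-1]'(by omega)) := by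
      have hD := diffs_getElem? ts (n-1) (by omega)
      simp only [hidx] at hD
      exact hD
    have hdrop : (diffs ts).drop (n - 1) = (ts[n]'hnlt - ts[n-1]'(by omega)) :: (diffs ts).drop n := by
      have hjd : n - 1 < (diffs ts).length := by rw [length_diffs]; omega
      rw [List.drop_eq_getElem_cons hjd, hidx]
      have h2 := List.getElem?_eq_getElem (l := diffs ts) (i := n-1) hjd
      rw [hdval] at h2
      rw [(Option.some.inj h2).symm]
    rw [hdrop, repList]
    have ihap := ih (n + 1) (acc ++ [sign (ts[n]'hnlt - ts[n-1]'(by omega)) (if (lastW h).sum > 0 then 1 else 0)])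
        (h ++ [sign1 (ts[n]'hnlt - ts[n-1]'(by omega))]) (by omega)
        (by rw [← List.drop_drop]; rw [← hsuf]; rfl)
        (by
          have h1 : (n + 1) - 1 = (n - 1) + 1 := by omega
          rw [h1, List.take_succ, List.map_append, ← hh]
          congr 1
          rw [hdval]
          simp)
    have hcast : ((n : Int) + 1) = ((n + 1 : Nat) : Int) := by omega
    rw [hcast, ihap]
    simp

theorem tsRep_eq (ts : List Int) : timeseries_represent ts = repList [] (diffs ts) := by
  cases ts with
  | nil => rfl
  | cons t rest =>
    unfold timeseries_represent
    rw [PySem.List.enumerate_cons, List.foldl_cons]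
    have hstep0 : tsRepStep (t :: rest) ([], []) ((0:Int), t) = ([], []) := by
      unfold tsRepStep; simp
    rw [hstep0]
    have hm := tsRep_master (t :: rest) rest 1 [] [] (le_refl 1) rfl (by simp)
    simpa using hm

theorem sign_eq_v (d S : Int) :
    sign d (if S > 0 then 1 else 0) = if d > 0 then 1 else if d < 0 then 0 else if S > 0 then 1 else 0 := by
  unfold sign; split_ifs <;> omega

theorem zJudgeLoop_eq_refLoop (ds h : List Int) (seen : Bool) :
    zJudgeLoop (repList h ds) (if seen then 2 else 0) = refLoop h ds seen := by
  induction ds generalizing h seen with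
  | nil => cases seen <;> rfl
  | cons d ds ih =>
    rw [repList, refLoop]
    simp only [sign_eq_v]
    set v : Int := if d > 0 then 1 else if d < 0 then 0 else if (lastW h).sum > 0 then 1 else 0 with hv
    clear_value v
    have v01 : v = 0 ∨ v = 1 := by rw [hv]; split_ifs <;> simp
    rw [zJudgeLoop]
    rcases v01 with h0 | h1
    · subst h0
      cases seen <;> (simp; simpa using ih (h ++ [sign1 d]) true)
    · subst h1
      cases seen
      · simp
        simpa using ih (h ++ [sign1 d]) false
      · simp

theorem sum_tail_of_headD (l : List Int) (hne : l ≠ []) : l.tail.sum = l.sum - l.headD 0 := by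
  cases l with
  | nil => simp at hne
  | cons a t => simp

theorem zAltLoop_eq_refLoop (rest : List Int) (prev : Int) (h : List Int) (seen : Bool) :
    zAltLoop prev rest (lastW h) (lastW h).sum seen = refLoop h (diffs (prev :: rest)) seen := by
  induction rest generalizing prev h seen with
  | nil => rfl
  | cons x r ih =>
    show zAltLoop prev (x :: r) (lastW h) (lastW h).sum seen = refLoop h ((x - prev) :: diffs (x :: r)) seen
    rw [zAltLoop, refLoop]
    set d := x - prev with hd
    set v : Int := if d > 0 then 1 else if d < 0 then 0 else if (lastW h).sum > 0 then 1 else 0 with hv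
    by_cases hc : (v ≠ 0 && seen) = true
    · rw [if_pos hc, if_pos hc]
    · rw [if_neg hc, if_neg hc]
      have hs : (if d > 0 then (1:Int) else if d < 0 then -1 else 0) = sign1 d := rfl
      have hwin : (if (lastW h).length = 59 then (lastW h).tail ++ [sign1 d] else lastW h ++ [sign1 d])
          = lastW (h ++ [sign1 d]) := (lastW_snoc h (sign1 d)).symm
      have hsum : (if (lastW h).length = 59 then (lastW h).sum - (lastW h).headD 0 else (lastW h).sum) + sign1 d
          = (lastW (h ++ [sign1 d])).sum := by
        rw [lastW_snoc h (sign1 d)]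
        split_ifs with hl
        · have hne : lastW h ≠ [] := by intro hh; rw [hh] at hl; simp at hl
          rw [List.sum_append, sum_tail_of_headD _ hne]; simp
        · simp
      show zAltLoop x r (if (lastW h).length = 59 then (lastW h).tail ++ [sign1 d] else lastW h ++ [sign1 d])
            ((if (lastW h).length = 59 then (lastW h).sum - (lastW h).headD 0 else (lastW h).sum) + sign1 d)
            (seen || v == 0) = _
      rw [hwin, hsum, ih]

-- ===== VERDICT (by name: the statement is the Claim_ definition above) =====
theorem z_judge_spec : Claim_equal_z_judge := by
  intro ts _
  unfold Spec_z_judge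
  cases ts with
  | nil => rfl
  | cons x rest =>
    show z_judge (x :: rest) = zAltLoop x rest [] 0 false
    have h1 : zAltLoop x rest [] 0 false = refLoop [] (diffs (x :: rest)) false := by
      have := zAltLoop_eq_refLoop rest x [] false
      simpa [lastW] using this
    rw [h1]
    unfold z_judge
    rw [tsRep_eq]
    have := zJudgeLoop_eq_refLoop (diffs (x :: rest)) [] false
    simpa using this
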